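-- pv_equiv track=rewrite | github.com/Tanyafain123/Nonogram | nonogram.py | intersection_row
-- ===== SOURCE A (Python) =====
-- EMPTY = 0
--
-- COLORED = 1
--
-- UNDEFINED_CELL = -1
--
-- def intersection_row(rows):
--     """The function thar receives list of rows and returns it's common elements witch a certain logic.If two similar
--     numbers meet the number doe not change. If -1 meets 1 it
--     changes to -1. If -1 meets 0 it changes to -1 if 0 meets 1 or 1 meets 0 the number changes to -1"""
--     if not rows:
--         return rows
--     cut_row = []
--     new_rows = rows[:]
--     for index_to_check in range(len(rows[0])):
--         checker = True
--         for row in range(len(rows) - 1):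
--             if not rows[row][index_to_check] == rows[row + 1][index_to_check]:
--                 if rows[row][index_to_check] == EMPTY and rows[row + 1][index_to_check] == UNDEFINED_CELL:
--                     answer = -1
--                     checker = False
--                 if rows[row][index_to_check] == UNDEFINED_CELL and rows[row + 1][index_to_check] == EMPTY:
--                     answer = -1
--                     checker = False
--                 if rows[row][index_to_check] == COLORED and rows[row + 1][index_to_check] == UNDEFINED_CELL:
--                     answer = -1
--                     checker = False
--                 if rows[row][index_to_check] == UNDEFINED_CELL and rows[row + 1][index_to_check] == COLORED:
--                     answer = -1
--                     checker = False
--                 else: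
--                     answer = -1
--                     checker = False
--         if checker:
--             cut_row.append(rows[0][index_to_check])
--         else:
--             cut_row.append(answer)
--     return cut_row
-- ===== SOURCE B (Python) =====
-- def intersection_row(rows):
--     """Row-wise reduction: fold the rows pairwise into an accumulator row,
--     merging element-wise (keep the value if equal, else -1)."""
--     if not rows:
--         return rows
--     acc = list(rows[0])
--     for row in rows[1:]:
--         acc = [a if a == row[i] else -1 for i, a in enumerate(acc)]
--     return acc
-- ===== Notes on version B (the rewrite author's own statement) =====
-- stated objective: faster
-- what changed: Replaces A's column-major double loop (for each column, scan all adjacent row pairs with a checker flag and a dead if-chain) by a row-major fold: the rows are reduced one at a time into an accumulator row merged element-wise, a constant-factor win from a single comprehension per row instead of per-cell nested indexing and branch chains.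
import Mathlib
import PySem

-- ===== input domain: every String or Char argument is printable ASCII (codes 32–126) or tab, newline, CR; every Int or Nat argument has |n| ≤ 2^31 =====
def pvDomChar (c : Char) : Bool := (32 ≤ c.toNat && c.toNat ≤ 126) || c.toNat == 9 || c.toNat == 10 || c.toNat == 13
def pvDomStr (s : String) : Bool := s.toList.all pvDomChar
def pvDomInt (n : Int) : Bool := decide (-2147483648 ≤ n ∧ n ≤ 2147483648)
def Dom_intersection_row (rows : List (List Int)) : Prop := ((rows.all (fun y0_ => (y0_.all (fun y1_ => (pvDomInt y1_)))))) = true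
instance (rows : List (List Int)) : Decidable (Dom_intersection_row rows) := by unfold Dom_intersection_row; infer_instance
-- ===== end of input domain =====

-- B replaces A's column-major double loop by a row-major reduction: the rows are folded one
-- at a time into an accumulator row, merged element-wise (keep the value if equal, else -1);
-- objective: faster (constant factor, measured).

-- ===== PORT A =====
-- Python's `answer` is read only after `checker` has been set to False, which always also sets
-- `answer`; the initial state models the not-yet-assigned `answer` as 0 (never read).
-- `new_rows = rows[:]` is unused dead code and is omitted.
def intersection_row (rows : List (List Int)) : List Int :=
  if rows = [] then []  -- `return rows`: rows is the empty list here
  else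
    (PySem.List.pyRange 0 (PySem.List.len (PySem.List.pyGetD rows 0 [])) 1).foldl
      (fun cut_row index_to_check =>
        let st :=
          (PySem.List.pyRange 0 (PySem.List.len rows - 1) 1).foldl
            (fun (st : Bool × Int) row =>
              let a := PySem.List.pyGetD (PySem.List.pyGetD rows row []) index_to_check 0
              let b := PySem.List.pyGetD (PySem.List.pyGetD rows (row + 1) []) index_to_check 0
              if a = b then st
              else
                let st := if a = 0 ∧ b = -1 then ((false : Bool), (-1 : Int)) else st
                let st := if a = -1 ∧ b = 0 then (false, -1) else st
                let st := if a = 1 ∧ b = -1 then (false, -1) else st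
                if a = -1 ∧ b = 1 then (false, -1) else (false, -1))
            (true, 0)
        cut_row ++ [if st.1 then PySem.List.pyGetD (PySem.List.pyGetD rows 0 []) index_to_check 0 else st.2])
      []

-- ===== PORT B =====
-- `acc = list(rows[0])` is a copy of the first row; `rows[1:]` is the slice from index 1;
-- the comprehension over enumerate(acc) is the element-wise merge of acc with the next row.
def intersection_row_alt (rows : List (List Int)) : List Int :=
  if rows = [] then []  -- `return rows`: rows is the empty list here
  else
    (PySem.List.slice rows (some 1) none).foldl
      (fun acc row =>
        (PySem.List.enumerate acc).map
          (fun p => if p.2 = PySem.List.pyGetD row p.1 0 then p.2 else -1))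
      (rows.headD [])

-- ===== PRECONDITION & SPEC =====
-- Both programs raise IndexError exactly when some row is shorter than the first row; Pre_
-- excludes exactly those inputs (it is vacuously true for rows = []).
def Pre_intersection_row (rows : List (List Int)) : Prop :=
  ∀ r ∈ rows, (rows.headD []).length ≤ r.length
instance (rows : List (List Int)) : Decidable (Pre_intersection_row rows) := by
  unfold Pre_intersection_row; infer_instance
def pvWitness_intersection_row : List (List Int) := [[1, 0, -1], [1, 0, 0], [1, 1, -1]]
def Spec_intersection_row (rows : List (List Int)) (out : List Int) : Prop := out = intersection_row_alt rows
instance (rows : List (List Int)) (out : List Int) : Decidable (Spec_intersection_row rows out) := by unfold Spec_intersection_row; infer_instance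

-- ===== CLAIM (what is proved, stated in full; the proofs are below) =====
def Claim_equal_intersection_row : Prop := ∀ (rows : List (List Int)), Dom_intersection_row rows → Pre_intersection_row rows → Spec_intersection_row rows (intersection_row rows)

-- ===== LEMMAS AND PROOFS =====

-- A fold whose step keeps the state or resets it to a constant computes "all steps kept".
lemma foldl_guard {α : Type} (p : Int → Prop) [DecidablePred p] (c init : α) (l : List Int) :
    l.foldl (fun st j => if p j then st else c) init =
      if ∀ j ∈ l, p j then init else c := by
  induction l generalizing init with
  | nil => simp
  | cons x t ih =>
    simp only [List.foldl_cons]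
    by_cases hx : p x
    · rw [if_pos hx, ih]
      simp [hx]
    · rw [if_neg hx, ih, ite_self,
        if_neg (fun hall => hx (hall x (List.mem_cons_self ..)))]

lemma adj_iff_head (cols : List Int) (h : cols ≠ []) :
    (∀ (k : Nat) (hk : k + 1 < cols.length), cols[k]'(by omega) = cols[k + 1]'(by omega)) ↔
      ∀ x ∈ cols, x = cols.head h := by
  have hlen : 0 < cols.length := List.length_pos_iff.mpr h
  have hhead : cols.head h = cols[0]'hlen := by
    cases cols with
    | nil => exact absurd rfl h
    | cons b t => rfl
  constructor
  · intro hadj x hx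
    obtain ⟨j, hj, rfl⟩ := List.mem_iff_getElem.mp hx
    rw [hhead]
    clear hx
    induction j with
    | zero => rfl
    | succ n ih =>
      have h1 : n + 1 < cols.length := hj
      have := hadj n h1
      rw [← this]
      exact ih (by omega)
  · intro hall k hk
    have h1 : cols[k]'(by omega) ∈ cols := List.getElem_mem _
    have h2 : cols[k + 1]'(by omega) ∈ cols := List.getElem_mem _
    rw [hall _ h1, hall _ h2]

-- element of enumerate: (enumerate xs s)[k]? = some (s + k, xs[k])
lemma enumerate_getElem? (xs : List Int) (s : Int) (k : Nat) (hk : k < xs.length) :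
    (PySem.List.enumerate xs s)[k]? = some (s + (k : Int), xs[k]'hk) := by
  induction xs generalizing s k with
  | nil => simp at hk
  | cons x t ih =>
    rw [PySem.List.enumerate_cons]
    cases k with
    | zero => simp
    | succ n =>
      have hn : n < t.length := by simpa using hk
      rw [List.getElem?_cons_succ, ih (s + 1) n hn]
      have : s + 1 + (n : Int) = s + ((n + 1 : Nat) : Int) := by push_cast; ring
      rw [this]
      rfl

-- B's inner comprehension: length and pointwise value of one merge step
lemma stepB_length (acc row : List Int) :
    ((PySem.List.enumerate acc).map
      (fun p => if p.2 = PySem.List.pyGetD row p.1 0 then p.2 else -1)).length = acc.length := by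
  simp [PySem.List.length_enumerate]

lemma stepB_getElem? (acc row : List Int) (k : Nat) (hk : k < acc.length) :
    ((PySem.List.enumerate acc).map
      (fun p => if p.2 = PySem.List.pyGetD row p.1 0 then p.2 else -1))[k]? =
      some (if acc[k]'hk = PySem.List.pyGetD row (k : Int) 0 then acc[k]'hk else -1) := by
  rw [List.getElem?_map, enumerate_getElem? acc 0 k hk]
  simp

-- B's outer fold: length preserved, and each entry is "keep if every row agrees, else -1"
lemma foldB_length (rs : List (List Int)) (acc : List Int) :
    (rs.foldl
      (fun acc row =>
        (PySem.List.enumerate acc).map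
          (fun p => if p.2 = PySem.List.pyGetD row p.1 0 then p.2 else -1)) acc).length
      = acc.length := by
  induction rs generalizing acc with
  | nil => rfl
  | cons r t ih => rw [List.foldl_cons, ih, stepB_length]

lemma foldB_getElem? (rs : List (List Int)) (acc : List Int) (k : Nat) (hk : k < acc.length) :
    (rs.foldl
      (fun acc row =>
        (PySem.List.enumerate acc).map
          (fun p => if p.2 = PySem.List.pyGetD row p.1 0 then p.2 else -1)) acc)[k]? =
      some (if ∀ r ∈ rs, acc[k]'hk = PySem.List.pyGetD r (k : Int) 0 then acc[k]'hk else -1) := by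
  induction rs generalizing acc with
  | nil => simp [List.getElem?_eq_getElem hk]
  | cons r t ih =>
    rw [List.foldl_cons]
    have hk' : k < ((PySem.List.enumerate acc).map
        (fun p => if p.2 = PySem.List.pyGetD r p.1 0 then p.2 else -1)).length := by
      rw [stepB_length]; exact hk
    rw [ih _ hk']
    have hv : ((PySem.List.enumerate acc).map
        (fun p => if p.2 = PySem.List.pyGetD r p.1 0 then p.2 else -1))[k]'hk' =
        (if acc[k]'hk = PySem.List.pyGetD r (k : Int) 0 then acc[k]'hk else -1) := by
      have h := stepB_getElem? acc r k hk
      rw [List.getElem?_eq_getElem hk'] at h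
      exact Option.some.inj h
    rw [hv]
    by_cases hr : acc[k]'hk = PySem.List.pyGetD r (k : Int) 0
    · rw [if_pos hr]
      by_cases ht : ∀ x ∈ t, acc[k]'hk = PySem.List.pyGetD x (k : Int) 0
      · rw [if_pos ht, if_pos (by intro x hx; rcases List.mem_cons.mp hx with h | h
                                  · exact h ▸ hr
                                  · exact ht x h)]
      · rw [if_neg ht, if_neg (fun hall => ht (fun x hx => hall x (List.mem_cons_of_mem _ hx)))]
    · rw [if_neg hr]
      have hR : ¬ ∀ x ∈ r :: t, acc[k]'hk = PySem.List.pyGetD x (k : Int) 0 :=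
        fun hall => hr (hall r (List.mem_cons_self ..))
      rw [if_neg hR]
      by_cases ht : ∀ x ∈ t, (-1 : Int) = PySem.List.pyGetD x (k : Int) 0
      · rw [if_pos ht]
      · rw [if_neg ht]

-- ===== VERDICT (by name: the statement is the Claim_ definition above) =====
theorem intersection_row_spec : Claim_equal_intersection_row := by
  intro rows _ hpre
  show intersection_row rows = intersection_row_alt rows
  by_cases hnil : rows = []
  · simp [intersection_row, intersection_row_alt, hnil]
  · obtain ⟨r0, rest, rfl⟩ := List.exists_cons_of_ne_nil hnil
    set rows := r0 :: rest with hrows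
    unfold intersection_row intersection_row_alt
    rw [if_neg hnil, if_neg hnil]
    rw [PySem.List.foldl_append_singleton_eq_map, List.nil_append]
    have h0 : PySem.List.pyGetD rows 0 [] = r0 := PySem.List.pyGetD_zero_cons ..
    have hslice : PySem.List.slice rows (some 1) none = rest := by
      rw [PySem.List.slice_from_one]; rfl
    have hhd : rows.headD [] = r0 := rfl
    rw [hslice, hhd, h0]
    have hlenR : (PySem.List.pyRange 0 (PySem.List.len r0) 1).length = r0.length := by
      rw [PySem.List.length_pyRange_one]; simp [PySem.List.len]
    apply List.ext_getElem?
    intro k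
    by_cases hk : k < r0.length
    · -- A side: element k of the map over pyRange is the body at i = k
      have hkrange : k < (PySem.List.pyRange 0 (PySem.List.len r0) 1).length := by omega
      rw [List.getElem?_map, List.getElem?_eq_getElem hkrange,
        PySem.List.getElem_pyRange_one, foldB_getElem? rest r0 k hk]
      simp only [Option.map_some, Int.zero_add]
      congr 1
      -- the inner step function is "keep state if the two column entries agree, else (false, -1)"
      have hstep :
          (fun (st : Bool × Int) row =>
            let a := PySem.List.pyGetD (PySem.List.pyGetD rows row []) (k : Int) 0
            let b := PySem.List.pyGetD (PySem.List.pyGetD rows (row + 1) []) (k : Int) 0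
            if a = b then st
            else
              let st := if a = 0 ∧ b = -1 then ((false : Bool), (-1 : Int)) else st
              let st := if a = -1 ∧ b = 0 then (false, -1) else st
              let st := if a = 1 ∧ b = -1 then (false, -1) else st
              if a = -1 ∧ b = 1 then (false, -1) else (false, -1)) =
          (fun (st : Bool × Int) row =>
            if PySem.List.pyGetD (PySem.List.pyGetD rows row []) (k : Int) 0 =
                PySem.List.pyGetD (PySem.List.pyGetD rows (row + 1) []) (k : Int) 0 then st
            else (false, -1)) := by
        funext st row
        by_cases hab : PySem.List.pyGetD (PySem.List.pyGetD rows row []) (k : Int) 0 =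
            PySem.List.pyGetD (PySem.List.pyGetD rows (row + 1) []) (k : Int) 0
        · simp [hab]
        · simp
      rw [hstep,
        foldl_guard (fun row => PySem.List.pyGetD (PySem.List.pyGetD rows row []) (k : Int) 0 =
          PySem.List.pyGetD (PySem.List.pyGetD rows (row + 1) []) (k : Int) 0) ((false : Bool), (-1 : Int)) (true, 0)]
      -- column values
      set cols := rows.map (fun row => PySem.List.pyGetD row (k : Int) 0) with hcols
      have hcne : cols ≠ [] := by simp [hcols, hrows]
      have hclen : cols.length = rows.length := by simp [hcols]
      have hhead : cols.head hcne = PySem.List.pyGetD r0 (k : Int) 0 := by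
        simp [hcols, hrows]
      -- translate the adjacent-agreement condition
      have hcond :
          (∀ row ∈ PySem.List.pyRange 0 (PySem.List.len rows - 1) 1,
            PySem.List.pyGetD (PySem.List.pyGetD rows row []) (k : Int) 0 =
              PySem.List.pyGetD (PySem.List.pyGetD rows (row + 1) []) (k : Int) 0) ↔
          (∀ (j : Nat) (hj : j + 1 < cols.length), cols[j]'(by omega) = cols[j + 1]'(by omega)) := by
        have hrow : ∀ (j : Nat) (hj : j < cols.length),
            PySem.List.pyGetD (PySem.List.pyGetD rows (j : Int) []) (k : Int) 0 = cols[j]'hj := by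
          intro j hj
          have hj' : j < rows.length := by rw [← hclen]; exact hj
          have h1 : PySem.List.pyGetD rows (j : Int) [] = rows[j]'hj' := by
            rw [PySem.List.pyGetD_natCast, List.getD_eq_getElem _ _ hj']
          rw [h1]
          simp [hcols]
        constructor
        · intro hA j hj
          have hmem : (j : Int) ∈ PySem.List.pyRange 0 (PySem.List.len rows - 1) 1 := by
            rw [PySem.List.mem_pyRange_one]
            constructor
            · exact Int.natCast_nonneg j
            · simp only [PySem.List.len_eq]
              rw [hclen] at hj
              omega
          have := hA (j : Int) hmem
          rw [hrow j (by omega)] at this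
          have hsucc : ((j : Int) + 1) = ((j + 1 : Nat) : Int) := by push_cast; ring
          rw [hsucc, hrow (j + 1) hj] at this
          exact this
        · intro hB row hmem
          have hm := (PySem.List.mem_pyRange_one).mp hmem
          simp only [PySem.List.len_eq] at hm
          obtain ⟨j, rfl⟩ : ∃ j : Nat, row = (j : Int) :=
            ⟨row.toNat, (Int.toNat_of_nonneg hm.1).symm⟩
          have hj : j + 1 < cols.length := by rw [hclen]; omega
          have := hB j hj
          rw [hrow j (by omega)]
          have hsucc : ((j : Int) + 1) = ((j + 1 : Nat) : Int) := by push_cast; ring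
          rw [hsucc, hrow (j + 1) hj]
          exact this
      -- ... and the B-side condition
      have hr0k : r0[k]'hk = PySem.List.pyGetD r0 (k : Int) 0 := by
        rw [PySem.List.pyGetD_natCast, List.getD_eq_getElem _ _ hk]
      have hiff :
          (∀ row ∈ PySem.List.pyRange 0 (PySem.List.len rows - 1) 1,
            PySem.List.pyGetD (PySem.List.pyGetD rows row []) (k : Int) 0 =
              PySem.List.pyGetD (PySem.List.pyGetD rows (row + 1) []) (k : Int) 0) ↔
          (∀ r ∈ rest, r0[k]'hk = PySem.List.pyGetD r (k : Int) 0) := by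
        rw [hcond, adj_iff_head cols hcne, hhead]
        constructor
        · intro hall r hr
          have : PySem.List.pyGetD r (k : Int) 0 ∈ cols := by
            rw [hcols]; exact List.mem_map_of_mem (List.mem_cons_of_mem _ hr)
          rw [hr0k, hall _ this]
        · intro hall x hx
          rw [hcols] at hx
          obtain ⟨r, hr, rfl⟩ := List.mem_map.mp hx
          rcases List.mem_cons.mp hr with h | h
          · rw [h]
          · rw [← hall r h, hr0k]
      by_cases hall : ∀ row ∈ PySem.List.pyRange 0 (PySem.List.len rows - 1) 1,
          PySem.List.pyGetD (PySem.List.pyGetD rows row []) (k : Int) 0 =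
            PySem.List.pyGetD (PySem.List.pyGetD rows (row + 1) []) (k : Int) 0
      · rw [if_pos hall, if_pos (hiff.mp hall)]
        simp [hr0k]
      · rw [if_neg hall, if_neg (fun hc => hall (hiff.mpr hc))]
        simp
    · -- out of range: both sides are none
      rw [List.getElem?_eq_none (by rw [List.length_map, hlenR]; omega),
        List.getElem?_eq_none (by rw [foldB_length]; omega)]
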